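-- pv_equiv track=rewrite | github.com/biojuho/vibe-coding | projects/blind-to-x/pipeline/notion/_schema.py | _pick_by_keywords
-- ===== SOURCE A (Python) =====
-- def _pick_by_keywords(candidates, keywords, used, allow_fallback=True):
--     """DB 속성 목록(candidates)에서 키워드 매칭으로 최적 속성 선택."""
--     lowered_keywords = [item.lower() for item in keywords]
--     for candidate in candidates:
--         if candidate in used:
--             continue
--         lower_name = candidate.lower()
--         if any(keyword in lower_name for keyword in lowered_keywords):
--             return candidate
--     if not allow_fallback:
--         return None
--     for candidate in candidates:
--         if candidate not in used:
--             return candidate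
--     return None
-- ===== SOURCE B (Python) =====
-- def _pick_by_keywords(candidates, keywords, used, allow_fallback=True):
--     lowered_keywords = [item.lower() for item in keywords]
--     fallback = None
--     for candidate in candidates:
--         if candidate in used:
--             continue
--         if fallback is None:
--             fallback = candidate
--         lower_name = candidate.lower()
--         if any(keyword in lower_name for keyword in lowered_keywords):
--             return candidate
--     return fallback if allow_fallback else None
-- ===== Notes on version B (the rewrite author's own statement) =====
-- stated objective: simpler
-- what changed: Replaced the two sequential scans (match pass, then a second fallback pass over candidates) with one single pass that maintains a fallback accumulator holding the first unused candidate.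
import Mathlib
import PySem

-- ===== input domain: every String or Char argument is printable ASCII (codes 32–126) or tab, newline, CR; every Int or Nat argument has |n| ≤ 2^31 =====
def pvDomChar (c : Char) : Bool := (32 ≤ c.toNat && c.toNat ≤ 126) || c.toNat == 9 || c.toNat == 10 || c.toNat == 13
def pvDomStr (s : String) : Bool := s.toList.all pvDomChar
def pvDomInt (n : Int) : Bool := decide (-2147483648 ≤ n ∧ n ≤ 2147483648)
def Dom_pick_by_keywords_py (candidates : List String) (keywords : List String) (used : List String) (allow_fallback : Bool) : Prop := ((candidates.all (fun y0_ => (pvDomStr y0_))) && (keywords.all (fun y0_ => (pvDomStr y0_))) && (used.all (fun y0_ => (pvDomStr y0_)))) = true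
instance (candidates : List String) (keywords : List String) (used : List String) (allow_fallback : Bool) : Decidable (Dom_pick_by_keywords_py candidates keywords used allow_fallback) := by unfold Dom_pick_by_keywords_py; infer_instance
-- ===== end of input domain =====

-- B replaces A's two sequential scans with a single pass that carries a `fallback` accumulator (simpler, one traversal).


-- ===== PORT A =====
-- first loop of A: first unused candidate whose lowercased name contains some lowered keyword
def pickA_first (lowered used : List String) : List String → Option String
  | [] => none
  | c :: rest =>
    if used.contains c then pickA_first lowered used rest
    else if lowered.any (fun k => PySem.Str.isIn k (PySem.Str.lower c)) then some c
    else pickA_first lowered used rest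

-- second loop of A: first candidate not in used
def pickA_fallback (used : List String) : List String → Option String
  | [] => none
  | c :: rest => if !(used.contains c) then some c else pickA_fallback used rest

def pick_by_keywords_py (candidates : List String) (keywords : List String) (used : List String) (allow_fallback : Bool) : Option String :=
  let lowered := keywords.map PySem.Str.lower
  match pickA_first lowered used candidates with
  | some c => some c
  | none => if !allow_fallback then none else pickA_fallback used candidates

-- ===== PORT B =====
-- single pass with a fallback accumulator; at loop end return fallback only if allow_fallback
def pickB_go (lowered used : List String) (af : Bool) (fb : Option String) : List String → Option String
  | [] => if af then fb else none
  | c :: rest =>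
    if used.contains c then pickB_go lowered used af fb rest
    else
      let fb' := if fb.isNone then some c else fb
      if lowered.any (fun k => PySem.Str.isIn k (PySem.Str.lower c)) then some c
      else pickB_go lowered used af fb' rest

def pick_by_keywords_py_alt (candidates : List String) (keywords : List String) (used : List String) (allow_fallback : Bool) : Option String :=
  pickB_go (keywords.map PySem.Str.lower) used allow_fallback none candidates

-- ===== PRECONDITION & SPEC =====
def Spec_pick_by_keywords_py (candidates : List String) (keywords : List String) (used : List String) (allow_fallback : Bool) (out : Option String) : Prop := out = pick_by_keywords_py_alt candidates keywords used allow_fallback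
instance (candidates : List String) (keywords : List String) (used : List String) (allow_fallback : Bool) (out : Option String) : Decidable (Spec_pick_by_keywords_py candidates keywords used allow_fallback out) := by unfold Spec_pick_by_keywords_py; infer_instance

-- ===== CLAIM (what is proved, stated in full; the proofs are below) =====
def Claim_equal_pick_by_keywords_py : Prop := ∀ (candidates : List String) (keywords : List String) (used : List String) (allow_fallback : Bool), Dom_pick_by_keywords_py candidates keywords used allow_fallback → Spec_pick_by_keywords_py candidates keywords used allow_fallback (pick_by_keywords_py candidates keywords used allow_fallback)

-- ===== LEMMAS AND PROOFS =====

-- Invariant of B's single pass: it equals A's first scan, falling back (through the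
-- accumulator, then A's second scan) when the first scan finds nothing.
theorem pickB_go_eq (lowered used : List String) (af : Bool) (fb : Option String)
    (cands : List String) :
    pickB_go lowered used af fb cands =
      match pickA_first lowered used cands with
      | some c => some c
      | none => if af then
          (match fb with
           | some x => some x
           | none => pickA_fallback used cands)
        else none := by
  induction cands generalizing fb with
  | nil => cases fb <;> simp [pickB_go, pickA_first, pickA_fallback]
  | cons c rest ih =>
    by_cases hu : c ∈ used
    · simp [pickB_go, pickA_first, pickA_fallback, hu, ih]
    · by_cases hm : ∃ x ∈ lowered, PySem.Chars.isIn x.toList (PySem.Chars.lower c.toList) = true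
      · simp [pickB_go, pickA_first, hu, hm]
      · cases fb <;>
          simp [pickB_go, pickA_first, pickA_fallback, hu, hm, ih]

-- ===== VERDICT (by name: the statement is the Claim_ definition above) =====
theorem pick_by_keywords_py_spec : Claim_equal_pick_by_keywords_py := by
  intro candidates keywords used allow_fallback _
  unfold Spec_pick_by_keywords_py pick_by_keywords_py pick_by_keywords_py_alt
  rw [pickB_go_eq]
  cases h : pickA_first (keywords.map PySem.Str.lower) used candidates <;>
    cases allow_fallback <;> simp [h]
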